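-- pv_equiv track=rewrite | github.com/Gribachella/pygen-labs | num_guessing_game(1.3b).py | guaranteed_attempts
-- ===== SOURCE A (Python) =====
-- def guaranteed_attempts(a, b):
--     a, b = int(a), int(b)
--     counter = 0
--
--     while a <= b:
--         middle = (a + b) // 2
--         a = middle + 1
--         counter += 1
--
--     return counter
-- ===== SOURCE B (Python) =====
-- def guaranteed_attempts(a, b):
--     a, b = int(a), int(b)
--     return (b - a + 1).bit_length() if a <= b else 0
-- ===== Notes on version B (the rewrite author's own statement) =====
-- stated objective: faster
-- what changed: Replaced the halving while-loop (which counts binary-search steps over [a,b]) by the closed form bit_length(b-a+1), returning 0 for an empty range.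
import Mathlib
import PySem

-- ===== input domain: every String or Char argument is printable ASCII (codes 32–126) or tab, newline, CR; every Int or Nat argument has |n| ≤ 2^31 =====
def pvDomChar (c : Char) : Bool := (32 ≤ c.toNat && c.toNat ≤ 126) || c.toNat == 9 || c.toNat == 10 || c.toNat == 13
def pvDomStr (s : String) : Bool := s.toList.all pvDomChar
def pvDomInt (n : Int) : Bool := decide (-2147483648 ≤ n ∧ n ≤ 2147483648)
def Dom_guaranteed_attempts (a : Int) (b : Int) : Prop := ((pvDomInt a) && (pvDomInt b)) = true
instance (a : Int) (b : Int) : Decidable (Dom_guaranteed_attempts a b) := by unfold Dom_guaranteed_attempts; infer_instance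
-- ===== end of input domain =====

-- B replaces A's halving while-loop by the closed form bit_length(b-a+1), 0 for an empty range (O(1) vs A's O(log) loop; both too fast for a timing run to separate).
-- ===== PORT A =====
-- the while loop of A: state (a, counter); b fixed
def gaLoop (a b counter : Int) : Int :=
  if a ≤ b then
    gaLoop (PySem.Int.floordiv (a + b) 2 + 1) b (counter + 1)
  else
    counter
termination_by (b + 1 - a).toNat
decreasing_by
  have h2 := (PySem.Int.floordiv_two_mid_bounds (by omega : a ≤ b)).1
  omega

def guaranteed_attempts (a : Int) (b : Int) : Int := gaLoop a b 0

-- ===== PORT B =====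
-- closed form: (b - a + 1).bit_length() if a <= b else 0
def guaranteed_attempts_alt (a : Int) (b : Int) : Int :=
  if a ≤ b then ((PySem.Int.bitLength (b - a + 1) : Nat) : Int) else 0

-- ===== PRECONDITION & SPEC =====
def Spec_guaranteed_attempts (a : Int) (b : Int) (out : Int) : Prop := out = guaranteed_attempts_alt a b
instance (a : Int) (b : Int) (out : Int) : Decidable (Spec_guaranteed_attempts a b out) := by unfold Spec_guaranteed_attempts; infer_instance

-- ===== CLAIM (what is proved, stated in full; the proofs are below) =====
def Claim_equal_guaranteed_attempts : Prop := ∀ (a : Int) (b : Int), Dom_guaranteed_attempts a b → Spec_guaranteed_attempts a b (guaranteed_attempts a b)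

-- ===== LEMMAS AND PROOFS =====

lemma mid_step (a b : Int) (_h : a ≤ b) :
    b - (PySem.Int.floordiv (a + b) 2 + 1) + 1 = PySem.Int.floordiv (b - a + 1) 2 := by
  rw [PySem.Int.floordiv_eq_ediv_of_pos (by norm_num), PySem.Int.floordiv_eq_ediv_of_pos (by norm_num)]
  omega

lemma gaLoop_eq (a b counter : Int) :
    gaLoop a b counter = counter + (if a ≤ b then ((PySem.Int.bitLength (b - a + 1) : Nat) : Int) else 0) := by
  fun_induction gaLoop a b counter with
  | case1 a counter h ih =>
    rw [ih]
    have hbl := PySem.Int.bitLength_of_pos (n := b - a + 1) (by omega)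
    have hmid := mid_step a b h
    have hnn : 0 ≤ PySem.Int.floordiv (b - a + 1) 2 := by
      rw [PySem.Int.floordiv_eq_ediv_of_pos (by norm_num)]; omega
    rw [if_pos h, hbl]
    by_cases h2 : PySem.Int.floordiv (a + b) 2 + 1 ≤ b
    · rw [if_pos h2, hmid]
      push_cast
      omega
    · rw [if_neg h2]
      have hz : b - (PySem.Int.floordiv (a + b) 2 + 1) + 1 ≤ 0 := by omega
      rw [hmid] at hz
      have hz0 : PySem.Int.floordiv (b - a + 1) 2 = 0 := le_antisymm hz hnn
      rw [hz0, PySem.Int.bitLength_zero]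
      omega
  | case2 a counter h =>
    rw [if_neg h]
    omega

-- ===== VERDICT (by name: the statement is the Claim_ definition above) =====
theorem guaranteed_attempts_spec : Claim_equal_guaranteed_attempts := by
  intro a b _
  unfold Spec_guaranteed_attempts guaranteed_attempts guaranteed_attempts_alt
  rw [gaLoop_eq]
  simp
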